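-- pv_equiv track=rewrite | github.com/ElmoreV/diff-refactor | diff-refactor.py | all_maximal_matches
-- ===== SOURCE A (Python) =====
-- import difflib
--
-- def all_maximal_matches(a: list, b: list, min_size: int = 1) -> list[difflib.Match]:
--     # a: a sequence (list of characters | list of lines, etc.)
--     # b: a sequence (list of characters | list of lines, etc.)
--     # difflib SequenceMatcher.get_matching_blocks() returns a list of Match objects
--     # so we mimic that behavior here.
--     # The difference here is that we return all matches, so we output more match objects.
--     matches = []
--     for i in range(len(a)):
--         for j in range(len(b)):
--             if a[i] == b[j]:
--                 # Ensure we can't extend backward: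
--                 # either i==0 or j==0, or the previous elements are different
--                 if i == 0 or j == 0 or a[i - 1] != b[j - 1]:
--                     # Now extend forward
--                     k = 1
--                     # Extend match as long as lines are equal.
--                     while i + k < len(a) and j + k < len(b) and a[i + k] == b[j + k]:
--                         k += 1
--                     if k >= min_size:
--                         # Append a Match tuple (like difflib.Match)
--                         matches.append(difflib.Match(i, j, k))
--     # Append a final empty match to mimic SequenceMatcher behavior.
--     matches.append(difflib.Match(len(a), len(b), 0))
--     return matches
-- ===== SOURCE B (Python) =====
-- def all_maximal_matches(a: list, b: list, min_size: int = 1) -> list: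
--     # Index b's values, then compute all forward-extension lengths by dynamic
--     # programming over only the matching (i, j) pairs, scanning i from the end.
--     pos = {}
--     for j, y in enumerate(b):
--         pos.setdefault(y, []).append(j)
--     ext = {}
--     for i in range(len(a) - 1, -1, -1):
--         for j in pos.get(a[i], []):
--             ext[(i, j)] = 1 + ext.get((i + 1, j + 1), 0)
--     matches = []
--     for i, x in enumerate(a):
--         for j in pos.get(x, []):
--             k = ext[(i, j)]
--             if k >= min_size and (i == 0 or j == 0 or a[i - 1] != b[j - 1]):
--                 matches.append((i, j, k))
--     matches.append((len(a), len(b), 0))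
--     return matches
-- ===== Notes on version B (the rewrite author's own statement) =====
-- stated objective: alternative
-- what changed: Instead of scanning all (i,j) pairs and re-extending each candidate match forward element by element, B indexes b's positions in a dict and fills a run-length table by dynamic programming over only the matching (i,j) pairs, scanning i right-to-left, then emits the left-maximal starts in the same order; it trades A's repeated forward scans for dict-based memoisation, which wins on sparse matches but not on duplicate-heavy inputs.
import Mathlib
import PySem

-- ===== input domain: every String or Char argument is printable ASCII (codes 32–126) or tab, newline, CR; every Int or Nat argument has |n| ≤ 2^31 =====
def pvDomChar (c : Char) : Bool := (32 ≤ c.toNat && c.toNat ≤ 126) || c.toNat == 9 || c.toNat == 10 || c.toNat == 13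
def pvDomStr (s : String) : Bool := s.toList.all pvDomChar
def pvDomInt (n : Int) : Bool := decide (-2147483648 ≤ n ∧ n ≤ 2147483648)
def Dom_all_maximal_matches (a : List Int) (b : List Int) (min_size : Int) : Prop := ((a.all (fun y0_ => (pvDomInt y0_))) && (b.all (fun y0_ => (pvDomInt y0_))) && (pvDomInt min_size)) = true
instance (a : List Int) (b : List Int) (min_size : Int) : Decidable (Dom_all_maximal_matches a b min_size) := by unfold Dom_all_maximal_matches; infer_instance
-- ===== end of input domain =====

-- B replaces A's all-pairs scan (with a forward re-scan at every start pair) by a dict index of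
-- b's positions and a right-to-left dynamic program over only the matching (i, j) pairs.


-- ===== PORT A =====
-- 'while i + k < len(a) and j + k < len(b) and a[i+k] == b[j+k]: k += 1';
-- fuel a.length bounds the iteration count (each iteration needs i + k < len(a), i ≥ 0, k grows)
def amExtend (a b : List Int) (i j k : Int) : Nat → Int
  | 0 => k
  | fuel + 1 =>
    if i + k < PySem.List.len a ∧ j + k < PySem.List.len b ∧
        PySem.List.pyGetD a (i + k) 0 = PySem.List.pyGetD b (j + k) 0 then
      amExtend a b i j (k + 1) fuel
    else k

def all_maximal_matches (a : List Int) (b : List Int) (min_size : Int) : List (Int × Int × Int) :=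
  let out := (PySem.List.pyRange 0 (PySem.List.len a) 1).foldl (fun acc i =>
    (PySem.List.pyRange 0 (PySem.List.len b) 1).foldl (fun acc j =>
      if PySem.List.pyGetD a i 0 = PySem.List.pyGetD b j 0 then
        if i = 0 ∨ j = 0 ∨ PySem.List.pyGetD a (i - 1) 0 ≠ PySem.List.pyGetD b (j - 1) 0 then
          let k := amExtend a b i j 1 a.length
          if k ≥ min_size then acc ++ [(i, j, k)] else acc
        else acc
      else acc) acc) []
  out ++ [(PySem.List.len a, PySem.List.len b, 0)]

-- ===== PORT B =====
-- pos = {}; for j, y in enumerate(b): pos.setdefault(y, []).append(j)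
def bPos (b : List Int) : PySem.Dict Int (List Int) :=
  (PySem.List.enumerate b 0).foldl (fun d p => d.modify p.2 [] (· ++ [p.1])) PySem.Dict.empty

-- ext = {}; for i in range(len(a)-1, -1, -1): for j in pos.get(a[i], []): ext[(i,j)] = 1 + ext.get((i+1,j+1), 0)
def bExt (a b : List Int) : PySem.Dict (Int × Int) Int :=
  (PySem.List.pyRange (PySem.List.len a - 1) (-1) (-1)).foldl (fun d i =>
    ((bPos b).getD (PySem.List.pyGetD a i 0) []).foldl (fun d j =>
      d.insert (i, j) (1 + d.getD (i + 1, j + 1) 0)) d) PySem.Dict.empty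

def all_maximal_matches_alt (a : List Int) (b : List Int) (min_size : Int) : List (Int × Int × Int) :=
  let pos := bPos b
  let ext := bExt a b
  let out := (PySem.List.enumerate a 0).foldl (fun acc p =>
    (pos.getD p.2 []).foldl (fun acc j =>
      -- ext[(i, j)]: the key is always present at this point, so Python's d[key] agrees with getD _ 0
      let k := ext.getD (p.1, j) 0
      if k ≥ min_size ∧ (p.1 = 0 ∨ j = 0 ∨
          PySem.List.pyGetD a (p.1 - 1) 0 ≠ PySem.List.pyGetD b (j - 1) 0) then
        acc ++ [(p.1, j, k)]
      else acc) acc) []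
  out ++ [(PySem.List.len a, PySem.List.len b, 0)]

-- ===== PRECONDITION & SPEC =====
def Spec_all_maximal_matches (a : List Int) (b : List Int) (min_size : Int) (out : List (Int × Int × Int)) : Prop := out = all_maximal_matches_alt a b min_size
instance (a : List Int) (b : List Int) (min_size : Int) (out : List (Int × Int × Int)) : Decidable (Spec_all_maximal_matches a b min_size out) := by unfold Spec_all_maximal_matches; infer_instance

-- ===== CLAIM (what is proved, stated in full; the proofs are below) =====
def Claim_equal_all_maximal_matches : Prop := ∀ (a : List Int) (b : List Int) (min_size : Int), Dom_all_maximal_matches a b min_size → Spec_all_maximal_matches a b min_size (all_maximal_matches a b min_size)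

-- ===== LEMMAS AND PROOFS =====

-- length of the common run of a and b starting at positions i and j (fuel-driven; pvR fixes the fuel)
def pvRunLen (a b : List Int) : Nat → Int → Int → Int
  | 0, _, _ => 0
  | fuel + 1, i, j =>
    if i < (a.length : Int) ∧ j < (b.length : Int) ∧
        PySem.List.pyGetD a i 0 = PySem.List.pyGetD b j 0 then
      1 + pvRunLen a b fuel (i + 1) (j + 1)
    else 0

def pvR (a b : List Int) (i j : Int) : Int := pvRunLen a b a.length i j

lemma pvRunLen_out (a b : List Int) (f : Nat) (i j : Int) (h : (a.length : Int) ≤ i) :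
    pvRunLen a b f i j = 0 := by
  cases f with
  | zero => rfl
  | succ f => simp only [pvRunLen]; rw [if_neg]; rintro ⟨h1, -⟩; omega

lemma pvRunLen_congr (a b : List Int) :
    ∀ (f g : Nat) (i j : Int), 0 ≤ i → a.length ≤ f + i.toNat → a.length ≤ g + i.toNat →
      pvRunLen a b f i j = pvRunLen a b g i j := by
  intro f
  induction f with
  | zero =>
    intro g i j hi hf hg
    rw [pvRunLen_out a b 0 i j (by omega), pvRunLen_out a b g i j (by omega)]
  | succ f ih =>
    intro g i j hi hf hg
    cases g with
    | zero =>
      rw [pvRunLen_out a b _ i j (by omega), pvRunLen_out a b 0 i j (by omega)]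
    | succ g =>
      simp only [pvRunLen]
      by_cases hc : i < (a.length : Int) ∧ j < (b.length : Int) ∧
          PySem.List.pyGetD a i 0 = PySem.List.pyGetD b j 0
      · rw [if_pos hc, if_pos hc, ih g (i + 1) (j + 1) (by omega) (by omega) (by omega)]
      · rw [if_neg hc, if_neg hc]

lemma pvRunLen_unfold (a b : List Int) (f : Nat) (i j : Int) (hi : 0 ≤ i)
    (hf : a.length ≤ f + i.toNat) :
    pvRunLen a b f i j = if i < (a.length : Int) ∧ j < (b.length : Int) ∧
        PySem.List.pyGetD a i 0 = PySem.List.pyGetD b j 0 then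
      1 + pvRunLen a b f (i + 1) (j + 1)
    else 0 := by
  cases f with
  | zero => rw [if_neg (by rintro ⟨h1, -⟩; omega)]; rfl
  | succ f =>
    simp only [pvRunLen]
    by_cases hc : i < (a.length : Int) ∧ j < (b.length : Int) ∧
        PySem.List.pyGetD a i 0 = PySem.List.pyGetD b j 0
    · rw [if_pos hc, if_pos hc]
      congr 1
      exact pvRunLen_congr a b f (f + 1) (i + 1) (j + 1) (by omega) (by omega) (by omega)
    · rw [if_neg hc, if_neg hc]

lemma pvR_unfold (a b : List Int) (i j : Int) (hi : 0 ≤ i) :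
    pvR a b i j = if i < (a.length : Int) ∧ j < (b.length : Int) ∧
        PySem.List.pyGetD a i 0 = PySem.List.pyGetD b j 0 then
      1 + pvR a b (i + 1) (j + 1)
    else 0 := by
  unfold pvR
  rw [pvRunLen_unfold a b a.length i j hi (by omega)]

lemma amExtend_eq (a b : List Int) :
    ∀ (fuel : Nat) (i j k : Int), 0 ≤ i → 0 ≤ k → a.length ≤ fuel + (i + k).toNat →
      amExtend a b i j k fuel = k + pvR a b (i + k) (j + k) := by
  intro fuel
  induction fuel with
  | zero =>
    intro i j k hi hk hf
    rw [pvR_unfold a b _ _ (by omega), if_neg (by rintro ⟨h1, -⟩; omega)]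
    simp [amExtend]
  | succ fuel ih =>
    intro i j k hi hk hf
    simp only [amExtend, PySem.List.len_eq]
    by_cases hc : i + k < (a.length : Int) ∧ j + k < (b.length : Int) ∧
        PySem.List.pyGetD a (i + k) 0 = PySem.List.pyGetD b (j + k) 0
    · rw [if_pos hc, ih i j (k + 1) (by omega) (by omega) (by omega),
        pvR_unfold a b (i + k) (j + k) (by omega), if_pos hc]
      have h1 : i + (k + 1) = i + k + 1 := by ring
      have h2 : j + (k + 1) = j + k + 1 := by ring
      rw [h1, h2]; ring
    · rw [if_neg hc, pvR_unfold a b (i + k) (j + k) (by omega), if_neg hc]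
      ring

-- the common predicate: (i, j) starts a left-maximal match of run length ≥ min_size
abbrev pvQ (a b : List Int) (min_size i j : Int) : Prop :=
  PySem.List.pyGetD a i 0 = PySem.List.pyGetD b j 0 ∧
  (i = 0 ∨ j = 0 ∨ PySem.List.pyGetD a (i - 1) 0 ≠ PySem.List.pyGetD b (j - 1) 0) ∧
  min_size ≤ pvR a b i j

-- the common shape both ports are proved equal to
def pvCanon (a b : List Int) (min_size : Int) : List (Int × Int × Int) :=
  (PySem.List.pyRange 0 (PySem.List.len a) 1).flatMap (fun i =>
    ((PySem.List.pyRange 0 (PySem.List.len b) 1).filter (fun j => decide (pvQ a b min_size i j))).map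
      (fun j => (i, j, pvR a b i j))) ++ [(PySem.List.len a, PySem.List.len b, 0)]

lemma A_inner (a b : List Int) (ms i : Int) (hi0 : 0 ≤ i) (hi : i < (a.length : Int))
    (acc : List (Int × Int × Int)) :
    (PySem.List.pyRange 0 (PySem.List.len b) 1).foldl (fun acc j =>
      if PySem.List.pyGetD a i 0 = PySem.List.pyGetD b j 0 then
        if i = 0 ∨ j = 0 ∨ PySem.List.pyGetD a (i - 1) 0 ≠ PySem.List.pyGetD b (j - 1) 0 then
          let k := amExtend a b i j 1 a.length
          if k ≥ ms then acc ++ [(i, j, k)] else acc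
        else acc
      else acc) acc
    = acc ++ ((PySem.List.pyRange 0 (PySem.List.len b) 1).filter
        (fun j => decide (pvQ a b ms i j))).map (fun j => (i, j, pvR a b i j)) := by
  have h1 : (PySem.List.pyRange 0 (PySem.List.len b) 1).foldl (fun acc j =>
      if PySem.List.pyGetD a i 0 = PySem.List.pyGetD b j 0 then
        if i = 0 ∨ j = 0 ∨ PySem.List.pyGetD a (i - 1) 0 ≠ PySem.List.pyGetD b (j - 1) 0 then
          let k := amExtend a b i j 1 a.length
          if k ≥ ms then acc ++ [(i, j, k)] else acc
        else acc
      else acc) acc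
      = (PySem.List.pyRange 0 (PySem.List.len b) 1).foldl (fun acc j =>
      if pvQ a b ms i j then acc ++ [(i, j, pvR a b i j)] else acc) acc := by
    apply PySem.List.foldl_congr_mem
    intro acc j hj
    rw [PySem.List.mem_pyRange_one] at hj
    simp only [PySem.List.len_eq] at hj
    by_cases heq : PySem.List.pyGetD a i 0 = PySem.List.pyGetD b j 0
    · have hk : amExtend a b i j 1 a.length = pvR a b i j := by
        rw [amExtend_eq a b a.length i j 1 hi0 (by omega) (by omega),
          pvR_unfold a b i j hi0, if_pos ⟨hi, by omega, heq⟩]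
      rw [if_pos heq]
      simp only [hk]
      by_cases hs : i = 0 ∨ j = 0 ∨ PySem.List.pyGetD a (i - 1) 0 ≠ PySem.List.pyGetD b (j - 1) 0
      · rw [if_pos hs]
        by_cases hm : ms ≤ pvR a b i j
        · rw [if_pos hm, if_pos ⟨heq, hs, hm⟩]
        · rw [if_neg hm, if_neg (by rintro ⟨-, -, h⟩; exact hm h)]
      · rw [if_neg hs, if_neg (by rintro ⟨-, h, -⟩; exact hs h)]
    · rw [if_neg heq, if_neg (by rintro ⟨h, -⟩; exact heq h)]
  rw [h1]
  exact PySem.List.foldl_append_ite (fun j => pvQ a b ms i j) (fun j => (i, j, pvR a b i j)) _ _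

lemma A_eq_canon (a b : List Int) (min_size : Int) :
    all_maximal_matches a b min_size = pvCanon a b min_size := by
  unfold all_maximal_matches pvCanon
  have h1 : (PySem.List.pyRange 0 (PySem.List.len a) 1).foldl (fun acc i =>
    (PySem.List.pyRange 0 (PySem.List.len b) 1).foldl (fun acc j =>
      if PySem.List.pyGetD a i 0 = PySem.List.pyGetD b j 0 then
        if i = 0 ∨ j = 0 ∨ PySem.List.pyGetD a (i - 1) 0 ≠ PySem.List.pyGetD b (j - 1) 0 then
          let k := amExtend a b i j 1 a.length
          if k ≥ min_size then acc ++ [(i, j, k)] else acc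
        else acc
      else acc) acc) ([] : List (Int × Int × Int))
      = (PySem.List.pyRange 0 (PySem.List.len a) 1).foldl (fun acc i =>
      acc ++ ((PySem.List.pyRange 0 (PySem.List.len b) 1).filter
        (fun j => decide (pvQ a b min_size i j))).map (fun j => (i, j, pvR a b i j))) [] := by
    apply PySem.List.foldl_congr_mem
    intro acc i hi
    rw [PySem.List.mem_pyRange_one] at hi
    simp only [PySem.List.len_eq] at hi
    exact A_inner a b min_size i hi.1 hi.2 acc
  rw [h1, PySem.List.foldl_append_eq_flatMap, List.nil_append]

lemma pos_getD (b : List Int) (v : Int) :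
    (bPos b).getD v [] =
      (PySem.List.pyRange 0 (PySem.List.len b) 1).filter (fun j => PySem.List.pyGetD b j 0 == v) := by
  unfold bPos
  rw [PySem.List.enumerate_eq_map_pyRange b 0]
  have h1 : (List.map (fun j => (j, PySem.List.pyGetD b j 0)) (PySem.List.pyRange 0 (PySem.List.len b))).foldl
        (fun d p => d.modify p.2 [] (· ++ [p.1])) PySem.Dict.empty
      = (List.map (fun j => (PySem.List.pyGetD b j 0, j)) (PySem.List.pyRange 0 (PySem.List.len b))).foldl
        (fun d p => d.modify p.1 [] (· ++ [p.2])) PySem.Dict.empty := by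
    rw [List.foldl_map, List.foldl_map]
  rw [h1, PySem.Dict.getD_foldl_modify_append, PySem.Dict.getD_empty, List.nil_append,
    List.filter_map, List.map_map]
  simp only [Function.comp_def]
  rw [List.map_id_fun']
  rfl

-- the inner insert loop of bExt, pointwise
lemma ext_fold_insert (m : Int) (js : List Int) :
    ∀ (d : PySem.Dict (Int × Int) Int) (q : Int × Int),
      (js.foldl (fun d j => d.insert (m, j) (1 + d.getD (m + 1, j + 1) 0)) d).getD q 0
      = if q.1 = m ∧ q.2 ∈ js then 1 + d.getD (m + 1, q.2 + 1) 0 else d.getD q 0 := by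
  induction js with
  | nil => intro d q; simp
  | cons j js ih =>
    intro d q
    rw [List.foldl_cons, ih]
    have e1 : (d.insert (m, j) (1 + d.getD (m + 1, j + 1) 0)).getD (m + 1, q.2 + 1) 0
        = d.getD (m + 1, q.2 + 1) 0 := by
      rw [PySem.Dict.getD_insert, if_neg]
      simp only [Prod.mk.injEq, not_and]
      intro h; omega
    have e2 : (d.insert (m, j) (1 + d.getD (m + 1, j + 1) 0)).getD q 0
        = if q = (m, j) then 1 + d.getD (m + 1, j + 1) 0 else d.getD q 0 :=
      PySem.Dict.getD_insert d (m, j) q _ 0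
    rw [e1, e2]
    by_cases h1 : q.1 = m ∧ q.2 ∈ js
    · rw [if_pos h1, if_pos ⟨h1.1, List.mem_cons_of_mem j h1.2⟩]
    · rw [if_neg h1]
      by_cases h2 : q = (m, j)
      · subst h2
        rw [if_pos rfl, if_pos ⟨rfl, List.mem_cons_self⟩]
      · rw [if_neg h2, if_neg (by
          rintro ⟨hq1, hq2⟩
          rcases List.mem_cons.mp hq2 with h | h
          · exact h2 (Prod.ext hq1 h)
          · exact h1 ⟨hq1, h⟩)]

-- invariant of bExt's right-to-left loop: entries for rows ≥ m already hold the run lengths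
def pvPhi (a b : List Int) (d : PySem.Dict (Int × Int) Int) (m : Int) : Prop :=
  ∀ (i j : Int), 0 ≤ i → 0 ≤ j → d.getD (i, j) 0 = if m ≤ i then pvR a b i j else 0

def pvStep (a b : List Int) (d : PySem.Dict (Int × Int) Int) (i : Int) : PySem.Dict (Int × Int) Int :=
  ((bPos b).getD (PySem.List.pyGetD a i 0) []).foldl (fun d j =>
    d.insert (i, j) (1 + d.getD (i + 1, j + 1) 0)) d

lemma pvStep_inner (a b : List Int) (m : Int) (hm0 : 0 ≤ m) (hm : m < (a.length : Int))
    (d : PySem.Dict (Int × Int) Int) (hd : pvPhi a b d (m + 1)) :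
    pvPhi a b (pvStep a b d m) m := by
  intro i j hi hj
  unfold pvStep
  rw [pos_getD, ext_fold_insert]
  have hmem : (j ∈ (PySem.List.pyRange 0 (PySem.List.len b) 1).filter
      (fun j => PySem.List.pyGetD b j 0 == PySem.List.pyGetD a m 0)) ↔
      (j < (b.length : Int) ∧ PySem.List.pyGetD b j 0 = PySem.List.pyGetD a m 0) := by
    rw [List.mem_filter, PySem.List.mem_pyRange_one, PySem.List.len_eq, beq_iff_eq]
    constructor
    · rintro ⟨⟨-, h1⟩, h2⟩; exact ⟨h1, h2⟩
    · rintro ⟨h1, h2⟩; exact ⟨⟨hj, h1⟩, h2⟩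
  by_cases h1 : i = m ∧ j ∈ (PySem.List.pyRange 0 (PySem.List.len b) 1).filter
      (fun j => PySem.List.pyGetD b j 0 == PySem.List.pyGetD a m 0)
  · rw [if_pos h1]
    obtain ⟨hin, hbj⟩ := hmem.mp h1.2
    rw [hd (m + 1) (j + 1) (by omega) (by omega), if_pos (by omega),
      if_pos (by omega), h1.1, pvR_unfold a b m j hm0, if_pos ⟨hm, hin, hbj.symm⟩]
  · rw [if_neg h1, hd i j hi hj]
    by_cases h2 : m + 1 ≤ i
    · rw [if_pos h2, if_pos (show m ≤ i by omega)]
    · rw [if_neg h2]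
      by_cases h3 : m ≤ i
      · -- i = m but j is not a matching position: both sides are 0
        have hie : i = m := by omega
        rw [if_pos h3, hie, pvR_unfold a b m j hm0, if_neg]
        rintro ⟨-, hin, hbj⟩
        exact h1 ⟨hie, hmem.mpr ⟨hin, hbj.symm⟩⟩
      · rw [if_neg h3]

lemma pvExt_outer (a b : List Int) :
    ∀ (n : Nat) (d : PySem.Dict (Int × Int) Int), n ≤ a.length → pvPhi a b d n →
      pvPhi a b ((PySem.List.pyRange ((n : Int) - 1) (-1) (-1)).foldl (pvStep a b) d) 0 := by
  intro n
  induction n with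
  | zero =>
    intro d _ hd
    rw [PySem.List.pyRange_neg_one_eq_nil (by omega), List.foldl_nil]
    exact hd
  | succ n ih =>
    intro d hn hd
    have hc : ((n + 1 : Nat) : Int) - 1 = (n : Int) := by omega
    rw [hc, PySem.List.pyRange_neg_one_cons (by omega), List.foldl_cons]
    have hd' : pvPhi a b d ((n : Int) + 1) := by
      have hcc : ((n + 1 : Nat) : Int) = (n : Int) + 1 := by omega
      rw [← hcc]; exact hd
    exact ih (pvStep a b d n) (by omega) (pvStep_inner a b n (by omega) (by omega) d hd')

lemma ext_getD (a b : List Int) (i j : Int) (hi : 0 ≤ i) (hj : 0 ≤ j) :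
    (bExt a b).getD (i, j) 0 = pvR a b i j := by
  have h0 : pvPhi a b PySem.Dict.empty a.length := by
    intro i j hi hj
    rw [PySem.Dict.getD_empty]
    by_cases h : (a.length : Int) ≤ i
    · rw [if_pos h, pvR_unfold a b i j hi, if_neg (by rintro ⟨h1, -⟩; omega)]
    · rw [if_neg h]
  have h1 := pvExt_outer a b a.length PySem.Dict.empty (Nat.le_refl _) h0 i j hi hj
  rw [if_pos hi] at h1
  rw [← h1]
  rfl

lemma B_inner (a b : List Int) (ms i : Int) (hi0 : 0 ≤ i) (acc : List (Int × Int × Int)) :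
    ((bPos b).getD (PySem.List.pyGetD a i 0) []).foldl (fun acc j =>
      let k := (bExt a b).getD (i, j) 0
      if k ≥ ms ∧ (i = 0 ∨ j = 0 ∨
          PySem.List.pyGetD a (i - 1) 0 ≠ PySem.List.pyGetD b (j - 1) 0) then
        acc ++ [(i, j, k)]
      else acc) acc
    = acc ++ ((PySem.List.pyRange 0 (PySem.List.len b) 1).filter
        (fun j => decide (pvQ a b ms i j))).map (fun j => (i, j, pvR a b i j)) := by
  rw [pos_getD]
  have h2 : ((PySem.List.pyRange 0 (PySem.List.len b) 1).filter
        (fun j => PySem.List.pyGetD b j 0 == PySem.List.pyGetD a i 0)).foldl (fun acc j =>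
      let k := (bExt a b).getD (i, j) 0
      if k ≥ ms ∧ (i = 0 ∨ j = 0 ∨
          PySem.List.pyGetD a (i - 1) 0 ≠ PySem.List.pyGetD b (j - 1) 0) then
        acc ++ [(i, j, k)]
      else acc) acc
      = ((PySem.List.pyRange 0 (PySem.List.len b) 1).filter
        (fun j => PySem.List.pyGetD b j 0 == PySem.List.pyGetD a i 0)).foldl (fun acc j =>
      if ms ≤ pvR a b i j ∧ (i = 0 ∨ j = 0 ∨
          PySem.List.pyGetD a (i - 1) 0 ≠ PySem.List.pyGetD b (j - 1) 0) then
        acc ++ [(i, j, pvR a b i j)]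
      else acc) acc := by
    apply PySem.List.foldl_congr_mem
    intro acc j hj
    have hj0 : 0 ≤ j := by
      have := (List.mem_filter.mp hj).1
      rw [PySem.List.mem_pyRange_one] at this
      exact this.1
    simp only [ext_getD a b i j hi0 hj0, ge_iff_le]
  rw [h2, PySem.List.foldl_append_ite (fun j => ms ≤ pvR a b i j ∧ (i = 0 ∨ j = 0 ∨
      PySem.List.pyGetD a (i - 1) 0 ≠ PySem.List.pyGetD b (j - 1) 0))
      (fun j => (i, j, pvR a b i j)), List.filter_filter]
  congr 2
  apply List.filter_congr
  intro j hj
  by_cases he : PySem.List.pyGetD a i 0 = PySem.List.pyGetD b j 0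
  · have hb : (PySem.List.pyGetD b j 0 == PySem.List.pyGetD a i 0) = true := by
      rw [beq_iff_eq]; exact he.symm
    rw [hb, Bool.and_true]
    exact decide_eq_decide.mpr ⟨fun ⟨h1, h2⟩ => ⟨he, h2, h1⟩, fun ⟨_, h2, h3⟩ => ⟨h3, h2⟩⟩
  · have hb : (PySem.List.pyGetD b j 0 == PySem.List.pyGetD a i 0) = false := by
      rw [beq_eq_false_iff_ne]; exact fun h => he h.symm
    rw [hb, Bool.and_false]
    symm
    rw [decide_eq_false_iff_not]
    rintro ⟨h1, -⟩
    exact he h1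

lemma B_eq_canon (a b : List Int) (ms : Int) :
    all_maximal_matches_alt a b ms = pvCanon a b ms := by
  show ((PySem.List.enumerate a 0).foldl (fun acc p =>
    ((bPos b).getD p.2 []).foldl (fun acc j =>
      let k := (bExt a b).getD (p.1, j) 0
      if k ≥ ms ∧ (p.1 = 0 ∨ j = 0 ∨
          PySem.List.pyGetD a (p.1 - 1) 0 ≠ PySem.List.pyGetD b (j - 1) 0) then
        acc ++ [(p.1, j, k)]
      else acc) acc) []) ++ [(PySem.List.len a, PySem.List.len b, 0)] = _
  unfold pvCanon
  rw [PySem.List.enumerate_eq_map_pyRange a 0, List.foldl_map]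
  have h1 : (PySem.List.pyRange 0 (PySem.List.len a) 1).foldl (fun acc i =>
      ((bPos b).getD ((i, PySem.List.pyGetD a i 0) : Int × Int).2 []).foldl (fun acc j =>
        let k := (bExt a b).getD (((i, PySem.List.pyGetD a i 0) : Int × Int).1, j) 0
        if k ≥ ms ∧ (((i, PySem.List.pyGetD a i 0) : Int × Int).1 = 0 ∨ j = 0 ∨
            PySem.List.pyGetD a (((i, PySem.List.pyGetD a i 0) : Int × Int).1 - 1) 0 ≠ PySem.List.pyGetD b (j - 1) 0) then
          acc ++ [(((i, PySem.List.pyGetD a i 0) : Int × Int).1, j, k)]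
        else acc) acc) ([] : List (Int × Int × Int))
      = (PySem.List.pyRange 0 (PySem.List.len a) 1).foldl (fun acc i =>
        acc ++ ((PySem.List.pyRange 0 (PySem.List.len b) 1).filter
          (fun j => decide (pvQ a b ms i j))).map (fun j => (i, j, pvR a b i j))) [] := by
    apply PySem.List.foldl_congr_mem
    intro acc i hi
    rw [PySem.List.mem_pyRange_one] at hi
    exact B_inner a b ms i hi.1 acc
  rw [h1, PySem.List.foldl_append_eq_flatMap, List.nil_append]

-- ===== VERDICT (by name: the statement is the Claim_ definition above) =====
theorem all_maximal_matches_spec : Claim_equal_all_maximal_matches := by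
  intro a b min_size _
  unfold Spec_all_maximal_matches
  rw [A_eq_canon, B_eq_canon]
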